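-- pv_equiv track=rewrite | github.com/DuvanMontoya/Investigaci-n---Anclaje-Inerte | Herramientas/GenerarConteosPrimarios.py | is_norm_inerte_only
-- ===== SOURCE A (Python) =====
-- from typing import Dict, Iterable, List, Sequence, Tuple
--
-- def factorize_abs(n: int, primes: Sequence[int]) -> List[Tuple[int, int]]:
--     t = abs(int(n))
--     if t <= 1:
--         return []
--     out: List[Tuple[int, int]] = []
--     for p in primes:
--         if p * p > t:
--             break
--         if t % p == 0:
--             e = 0
--             while t % p == 0:
--                 t //= p
--                 e += 1
--             out.append((p, e))
--     if t > 1: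
--         out.append((int(t), 1))
--     return out
--
-- def chi_delta_p(delta: int, p: int) -> int:
--     """
--     Kronecker/Legaendre-like character used in the current pipeline.
--     """
--     if p == 2:
--         if delta % 2 == 0:
--             return 0
--         return -1 if delta % 8 == 5 else 1
--     if delta % p == 0:
--         return 0
--     t = pow(delta % p, (p - 1) // 2, p)
--     return 1 if t == 1 else -1
--
-- def is_norm_inerte_only(delta: int, n: int, primes: Sequence[int], include_two_inert: bool) -> bool:
--     """
--     Inert-only local filter:
--     - odd inert primes require even valuation in n;
--     - p=2 handled only when 2 is inert and include_two_inert=True.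
--     """
--     if n <= 0:
--         return False
--     for p, e in factorize_abs(n, primes):
--         if p == 2:
--             if include_two_inert and chi_delta_p(delta, 2) == -1 and (e % 2 == 1):
--                 return False
--         elif chi_delta_p(delta, p) == -1 and (e % 2 == 1):
--             return False
--     return True
-- ===== SOURCE B (Python) =====
-- def chi_delta_p(delta: int, p: int) -> int:
--     if p == 2:
--         if delta % 2 == 0:
--             return 0
--         return -1 if delta % 8 == 5 else 1
--     if delta % p == 0:
--         return 0
--     t = pow(delta % p, (p - 1) // 2, p)
--     return 1 if t == 1 else -1
--
--
-- def _is_bad(delta: int, p: int, include_two_inert: bool) -> bool: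
--     """p is an inert prime whose odd valuation forbids n (parity handled by caller)."""
--     if p == 2:
--         return include_two_inert and chi_delta_p(delta, 2) == -1
--     return chi_delta_p(delta, p) == -1
--
--
-- def is_norm_inerte_only(delta, n, primes, include_two_inert):
--     # Staged decomposition: precompute the set of forbidden ("bad") primes once,
--     # then strip SQUARE factors from |n| so only odd-parity primes survive; a
--     # surviving factor of a bad prime, or a bad residual cofactor, rejects n.
--     # No valuations are ever counted and no factor list is built.
--     if n <= 0:
--         return False
--     t = abs(int(n))
--     if t <= 1:
--         return True
--     bad = {p for p in primes if p >= 2 and _is_bad(delta, p, include_two_inert)}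
--     for p in primes:
--         if p * p > t:
--             break
--         while t % (p * p) == 0:
--             t //= p * p
--         if t % p == 0:
--             if p in bad:
--                 return False
--             t //= p
--     return t <= 1 or not _is_bad(delta, t, include_two_inert)
-- ===== Notes on version B (the rewrite author's own statement) =====
-- stated objective: alternative
-- what changed: B never counts valuations and never builds a factor list: a first pass precomputes the set of all forbidden ('bad') inert primes in the list, a second strips SQUARE factors from |n| so only odd-parity prime factors survive, rejecting when a surviving factor lies in the precomputed set (or the residual cofactor is forbidden); the trade is that B evaluates the character of every listed prime upfront, including ones A's break never reaches.
-- outside the precondition, e.g. on is_norm_inerte_only(13, 213, [-3], True): A returns False, B returns True; on is_norm_inerte_only(5, 10, [-3, 2], True): A returns False, B returns False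
import Mathlib
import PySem

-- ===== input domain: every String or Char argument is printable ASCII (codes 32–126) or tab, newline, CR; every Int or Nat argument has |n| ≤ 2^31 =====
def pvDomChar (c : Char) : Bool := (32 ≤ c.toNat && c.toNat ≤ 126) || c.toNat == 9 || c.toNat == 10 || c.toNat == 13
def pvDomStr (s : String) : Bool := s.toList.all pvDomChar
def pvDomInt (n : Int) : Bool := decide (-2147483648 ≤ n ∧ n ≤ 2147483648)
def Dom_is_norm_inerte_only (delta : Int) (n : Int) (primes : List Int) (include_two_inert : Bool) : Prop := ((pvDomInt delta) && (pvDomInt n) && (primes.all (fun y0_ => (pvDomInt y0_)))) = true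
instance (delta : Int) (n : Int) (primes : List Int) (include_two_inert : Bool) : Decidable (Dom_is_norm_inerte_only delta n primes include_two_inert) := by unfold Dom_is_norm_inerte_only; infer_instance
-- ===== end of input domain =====

-- B replaces A's factorize-then-scan by a staged decomposition: one pass precomputes
-- the set of forbidden inert primes, a second strips square factors from |n| (no
-- valuation counts, no factor list) and rejects surviving factors found in that set
-- (objective: alternative; trade: B evaluates the character of every listed prime
-- upfront, including ones A's break never reaches).

-- ===== PORT A =====
-- pow(b, e, m): square-and-multiply modular exponentiation, the algorithm CPython's
-- three-argument pow uses; equals b^e mod m for m > 0 (PySem.Int.powMod computes the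
-- same value but is O(e) and cannot be evaluated for the ~2^30 exponents reached here).
def pvPowMod (b : Int) (e : Nat) (m : Int) : Int :=
  if he : e = 0 then PySem.Int.mod 1 m
  else
    let h := pvPowMod (PySem.Int.mod (b * b) m) (e / 2) m
    if e % 2 = 1 then PySem.Int.mod (h * b) m else h
termination_by e
decreasing_by exact Nat.div_lt_self (Nat.pos_of_ne_zero he) (by norm_num)

-- shared module helper chi_delta_p; exact for p ≥ 2 — the only arguments chi_delta_p
-- receives inside Pre_ (Python's pow with a negative exponent/modulus is excluded by Pre_).
def chi_delta_p (delta : Int) (p : Int) : Int :=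
  if p == 2 then
    if PySem.Int.mod delta 2 == 0 then 0
    else if PySem.Int.mod delta 8 == 5 then -1 else 1
  else if PySem.Int.mod delta p == 0 then 0
  else
    let t := pvPowMod (PySem.Int.mod delta p) ((PySem.Int.floordiv (p - 1) 2).toNat) p
    if t == 1 then 1 else -1

-- A's inner `while t % p == 0: t //= p; e += 1`, with an accumulator e as in A;
-- fuel t.natAbs suffices whenever p ≥ 2 (t shrinks by a factor ≥ 2 each step).
def pvValLoop : Nat → Int → Int → Int → Int × Int
  | 0, t, _, e => (t, e)
  | f + 1, t, p, e =>
      if PySem.Int.mod t p == 0 then pvValLoop f (PySem.Int.floordiv t p) p (e + 1) else (t, e)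

-- A's `for p in primes` with break, plus the trailing `if t > 1: out.append((t, 1))`
def pvFactAux : List Int → Int → List (Int × Int)
  | [], t => if t > 1 then [(t, 1)] else []
  | p :: ps, t =>
      if p * p > t then (if t > 1 then [(t, 1)] else [])
      else if PySem.Int.mod t p == 0 then
        let r := pvValLoop t.natAbs t p 0
        (p, r.2) :: pvFactAux ps r.1
      else pvFactAux ps t

def factorize_abs (n : Int) (primes : List Int) : List (Int × Int) :=
  if |n| ≤ 1 then [] else pvFactAux primes |n|

-- A's `for p, e in factorize_abs(...)` check loop
def pvCheck (delta : Int) (inc : Bool) : List (Int × Int) → Bool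
  | [] => true
  | (p, e) :: rest =>
      if p == 2 then
        if inc && (chi_delta_p delta 2 == -1) && (PySem.Int.mod e 2 == 1) then false
        else pvCheck delta inc rest
      else if (chi_delta_p delta p == -1) && (PySem.Int.mod e 2 == 1) then false
      else pvCheck delta inc rest

def is_norm_inerte_only (delta : Int) (n : Int) (primes : List Int) (include_two_inert : Bool) : Bool :=
  if n ≤ 0 then false else pvCheck delta include_two_inert (factorize_abs n primes)

-- ===== PORT B =====
-- B's `_is_bad` helper (no parity argument: parity is handled structurally by B)
def pvBad (delta : Int) (p : Int) (inc : Bool) : Bool :=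
  if p == 2 then inc && (chi_delta_p delta 2 == -1)
  else chi_delta_p delta p == -1

-- B's `while t % (p*p) == 0: t //= p*p`; fuel t.natAbs suffices for p ≥ 2
def pvStripSq : Nat → Int → Int → Int
  | 0, t, _ => t
  | f + 1, t, p =>
      if PySem.Int.mod t (p * p) == 0 then pvStripSq f (PySem.Int.floordiv t (p * p)) p else t

-- B's main loop over primes: break, strip squares, test survival against the bad set;
-- loop exit and break both fall through to the residual-cofactor check
def pvBPass (delta : Int) (inc : Bool) (bad : PySem.Set Int) : List Int → Int → Bool
  | [], t => decide (t ≤ 1) || !(pvBad delta t inc)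
  | p :: ps, t =>
      if p * p > t then decide (t ≤ 1) || !(pvBad delta t inc)
      else
        let t1 := pvStripSq t.natAbs t p
        if PySem.Int.mod t1 p == 0 then
          if PySem.Set.contains bad p then false
          else pvBPass delta inc bad ps (PySem.Int.floordiv t1 p)
        else pvBPass delta inc bad ps t1

def is_norm_inerte_only_alt (delta : Int) (n : Int) (primes : List Int) (include_two_inert : Bool) : Bool :=
  if n ≤ 0 then false
  else if |n| ≤ 1 then true
  else
    let bad := PySem.Set.ofList (primes.filter (fun p => decide (2 ≤ p) && pvBad delta p include_two_inert))
    pvBPass delta include_two_inert bad primes |n|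

-- ===== PRECONDITION & SPEC =====
-- Pre_ restricts primes to the function's natural domain: when |n| ≥ 2, every listed
-- "prime" must be ≥ 2 unless its square already exceeds |n| (then the loop breaks
-- before touching it). On excluded inputs A diverges (p = 1 or p = -1 reached while
-- dividing), raises ZeroDivisionError (p = 0 reached), or, for reachable p ≤ -2,
-- A may still return (flooring by a negative divisor / pow with negative exponent) —
-- those returning inputs are excluded because the list then does not hold primes.
def Pre_is_norm_inerte_only (delta : Int) (n : Int) (primes : List Int) (include_two_inert : Bool) : Prop :=
  n ≤ 1 ∨ ∀ p ∈ primes, 2 ≤ p ∨ |n| < p * p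
instance (delta : Int) (n : Int) (primes : List Int) (include_two_inert : Bool) : Decidable (Pre_is_norm_inerte_only delta n primes include_two_inert) := by unfold Pre_is_norm_inerte_only; infer_instance

def pvWitness_is_norm_inerte_only : Int × Int × List Int × Bool := (5, 12, [2, 3], true)

def Spec_is_norm_inerte_only (delta : Int) (n : Int) (primes : List Int) (include_two_inert : Bool) (out : Bool) : Prop := out = is_norm_inerte_only_alt delta n primes include_two_inert
instance (delta : Int) (n : Int) (primes : List Int) (include_two_inert : Bool) (out : Bool) : Decidable (Spec_is_norm_inerte_only delta n primes include_two_inert out) := by unfold Spec_is_norm_inerte_only; infer_instance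

-- ===== CLAIM (what is proved, stated in full; the proofs are below) =====
def Claim_equal_is_norm_inerte_only : Prop := ∀ (delta : Int) (n : Int) (primes : List Int) (include_two_inert : Bool), Dom_is_norm_inerte_only delta n primes include_two_inert → Pre_is_norm_inerte_only delta n primes include_two_inert → Spec_is_norm_inerte_only delta n primes include_two_inert (is_norm_inerte_only delta n primes include_two_inert)

-- ===== LEMMAS AND PROOFS =====

-- proof-side reference function: (p-free kernel of t, valuation of p in t)
def pvCore (p t : Int) : Int × Int :=
  if h : 2 ≤ p ∧ 1 ≤ t ∧ p ∣ t then
    let r := pvCore p (PySem.Int.floordiv t p)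
    (r.1, r.2 + 1)
  else (t, 0)
termination_by t.natAbs
decreasing_by
  obtain ⟨hp, ht, hd⟩ := h
  rw [PySem.Int.floordiv_eq_ediv_of_pos (by omega)]
  have h1 : 1 ≤ t / p := by
    rcases hd with ⟨k, rfl⟩
    have : 1 ≤ k := by nlinarith
    rw [Int.mul_ediv_cancel_left _ (by omega)]; exact this
  have h2 : t / p < t := by
    rcases hd with ⟨k, rfl⟩
    rw [Int.mul_ediv_cancel_left _ (by omega : p ≠ 0)]
    nlinarith
  omega

-- division step bounds, used everywhere below
theorem pvDivStep (p t : Int) (hp : 2 ≤ p) (ht : 1 ≤ t) (hd : p ∣ t) :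
    1 ≤ PySem.Int.floordiv t p ∧ (PySem.Int.floordiv t p).natAbs < t.natAbs ∧
      PySem.Int.floordiv t p * p = t ∧ PySem.Int.floordiv t p ≤ t := by
  rw [PySem.Int.floordiv_eq_ediv_of_pos (by omega)]
  rcases hd with ⟨k, rfl⟩
  rw [Int.mul_ediv_cancel_left _ (by omega : p ≠ 0)]
  have hk : 1 ≤ k := by nlinarith
  refine ⟨hk, ?_, by ring, by nlinarith⟩
  have h2p : 2 ≤ p.natAbs := by omega
  have h1k : 1 ≤ k.natAbs := by omega
  rw [Int.natAbs_mul]; nlinarith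

theorem pvCore_aux (p : Int) (hp : 2 ≤ p) : ∀ (N : Nat) (t : Int), t.natAbs ≤ N → 1 ≤ t →
    1 ≤ (pvCore p t).1 ∧ (pvCore p t).1 ≤ t ∧ ¬ p ∣ (pvCore p t).1 ∧ 0 ≤ (pvCore p t).2 := by
  intro N
  induction N with
  | zero => intro t hN ht; omega
  | succ N ih =>
      intro t hN ht
      rw [pvCore]
      by_cases h : 2 ≤ p ∧ 1 ≤ t ∧ p ∣ t
      · obtain ⟨-, -, hd⟩ := h
        obtain ⟨h1, h2, h3, h4⟩ := pvDivStep p t hp ht hd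
        have := ih (PySem.Int.floordiv t p) (by omega) h1
        rw [dif_pos (show 2 ≤ p ∧ 1 ≤ t ∧ p ∣ t from ⟨hp, ht, hd⟩)]
        dsimp only
        exact ⟨this.1, le_trans this.2.1 h4, this.2.2.1, by omega⟩
      · rw [dif_neg h]
        exact ⟨ht, le_refl _, fun hdvd => h ⟨hp, ht, hdvd⟩, le_refl 0⟩

theorem pvCore_step (p t : Int) (hp : 2 ≤ p) (ht : 1 ≤ t) (hd : p ∣ t) :
    pvCore p t = ((pvCore p (PySem.Int.floordiv t p)).1, (pvCore p (PySem.Int.floordiv t p)).2 + 1) := by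
  conv_lhs => rw [pvCore]
  rw [dif_pos (show 2 ≤ p ∧ 1 ≤ t ∧ p ∣ t from ⟨hp, ht, hd⟩)]

theorem pvCore_stop (p t : Int) (h : ¬ (2 ≤ p ∧ 1 ≤ t ∧ p ∣ t)) : pvCore p t = (t, 0) := by
  conv_lhs => rw [pvCore]
  rw [dif_neg h]

theorem pvValLoop_eq_core (p : Int) (hp : 2 ≤ p) : ∀ (f : Nat) (t e : Int), 1 ≤ t → t.natAbs ≤ f →
    pvValLoop f t p e = ((pvCore p t).1, e + (pvCore p t).2) := by
  intro f
  induction f with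
  | zero => intro t e ht hf; omega
  | succ f ih =>
      intro t e ht hf
      rw [pvValLoop]
      by_cases hm : PySem.Int.mod t p == 0
      · have hd : p ∣ t := by
          rw [beq_iff_eq, PySem.Int.mod_eq_zero_iff_dvd] at hm; exact hm
        obtain ⟨h1, h2, h3, h4⟩ := pvDivStep p t hp ht hd
        rw [if_pos hm, ih _ _ h1 (by omega), pvCore_step p t hp ht hd]
        dsimp only
        rw [Prod.mk.injEq]
        exact ⟨rfl, by ring⟩
      · rw [if_neg (by simpa using hm)]
        have hnd : ¬ p ∣ t := by
          rw [beq_iff_eq, PySem.Int.mod_eq_zero_iff_dvd] at hm; exact hm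
        rw [pvCore_stop p t (by tauto)]
        simp

theorem pvStripSq_eq_core (p : Int) (hp : 2 ≤ p) : ∀ (f : Nat) (t : Int), 1 ≤ t → t.natAbs ≤ f →
    pvStripSq f t p =
      if (pvCore p t).2 % 2 = 0 then (pvCore p t).1 else (pvCore p t).1 * p := by
  intro f
  induction f with
  | zero => intro t ht hf; omega
  | succ f ih =>
      intro t ht hf
      rw [pvStripSq]
      by_cases hm : PySem.Int.mod t (p * p) == 0
      · have hd2 : p * p ∣ t := by rw [beq_iff_eq, PySem.Int.mod_eq_zero_iff_dvd] at hm; exact hm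
        have hd : p ∣ t := dvd_trans ⟨p, rfl⟩ hd2
        obtain ⟨h1, h2, h3, h4⟩ := pvDivStep p t hp ht hd
        have hd' : p ∣ PySem.Int.floordiv t p := by
          rcases hd2 with ⟨m, rfl⟩
          refine ⟨m, ?_⟩
          rw [PySem.Int.floordiv_eq_ediv_of_pos (by omega)]
          rw [show p * p * m = p * (p * m) by ring, Int.mul_ediv_cancel_left _ (by omega : p ≠ 0)]
        obtain ⟨h1', h2', h3', h4'⟩ := pvDivStep p (PySem.Int.floordiv t p) hp h1 hd'
        have heq : PySem.Int.floordiv t (p * p) = PySem.Int.floordiv (PySem.Int.floordiv t p) p := by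
          rw [PySem.Int.floordiv_eq_ediv_of_pos (by omega : (0:Int) < p),
              PySem.Int.floordiv_eq_ediv_of_pos (by omega : (0:Int) < p),
              PySem.Int.floordiv_eq_ediv_of_pos (by nlinarith : (0:Int) < p * p),
              Int.ediv_ediv_of_nonneg (by omega)]
        rw [if_pos hm, heq, ih _ h1' (by omega),
            pvCore_step p t hp ht hd, pvCore_step p _ hp h1 hd']
        dsimp only
        by_cases hpar : (pvCore p (PySem.Int.floordiv (PySem.Int.floordiv t p) p)).2 % 2 = 0
        · rw [if_pos hpar, if_pos (by omega)]
        · rw [if_neg hpar, if_neg (by omega)]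
      · rw [if_neg (by simpa using hm)]
        have hnd2 : ¬ p * p ∣ t := by rw [beq_iff_eq, PySem.Int.mod_eq_zero_iff_dvd] at hm; exact hm
        by_cases hd : p ∣ t
        · obtain ⟨h1, h2, h3, h4⟩ := pvDivStep p t hp ht hd
          have hnd' : ¬ p ∣ PySem.Int.floordiv t p := by
            intro ⟨m, hm'⟩
            exact hnd2 ⟨m, by rw [← h3, hm']; ring⟩
          rw [pvCore_step p t hp ht hd, pvCore_stop p _ (by tauto)]
          dsimp only
          norm_num
          exact h3.symm
        · rw [pvCore_stop p t (by tauto)]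
          norm_num

-- A's per-factor failure test folded into one predicate
theorem pvCheck_cons_eq (delta p e : Int) (inc : Bool) (X : Bool) :
    (if p == 2 then
        if inc && (chi_delta_p delta 2 == -1) && (PySem.Int.mod e 2 == 1) then false else X
      else if (chi_delta_p delta p == -1) && (PySem.Int.mod e 2 == 1) then false else X)
    = (if (PySem.Int.mod e 2 == 1) && pvBad delta p inc then false else X) := by
  unfold pvBad
  by_cases hp : p == 2 <;> simp [hp] <;> (congr 1) <;> ac_rfl

-- the residual-cofactor check: A's appended "(t, 1)" entry equals B's tail expression
theorem pvResid (delta : Int) (inc : Bool) (t : Int) :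
    pvCheck delta inc (if t > 1 then [(t, 1)] else [])
      = (decide (t ≤ 1) || !(pvBad delta t inc)) := by
  by_cases h : t > 1
  · rw [if_pos h]
    rw [show pvCheck delta inc [(t, 1)] =
        (if t == 2 then
          if inc && (chi_delta_p delta 2 == -1) && (PySem.Int.mod (1:Int) 2 == 1) then false
          else pvCheck delta inc []
        else if (chi_delta_p delta t == -1) && (PySem.Int.mod (1:Int) 2 == 1) then false
        else pvCheck delta inc []) from rfl]
    rw [pvCheck_cons_eq delta t 1 inc (pvCheck delta inc [])]
    have hm : (PySem.Int.mod (1:Int) 2 == 1) = true := by decide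
    rw [hm]
    cases hb : pvBad delta t inc <;> simp [pvCheck] <;> omega
  · rw [if_neg h]
    simp [pvCheck]; omega

-- membership in B's precomputed bad set, for a listed p ≥ 2
theorem pvContains (delta : Int) (inc : Bool) (primes : List Int) (p : Int)
    (hp2 : 2 ≤ p) (hmem : p ∈ primes) :
    PySem.Set.contains
      (PySem.Set.ofList (primes.filter (fun q => decide (2 ≤ q) && pvBad delta q inc))) p
      = pvBad delta p inc := by
  cases hb : pvBad delta p inc
  · rw [Bool.eq_false_iff, Ne, PySem.Set.contains_iff, PySem.Set.mem_ofList, List.mem_filter]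
    intro ⟨_, hf⟩
    rw [hb] at hf; simp at hf
  · have hin : p ∈ List.filter (fun q => decide (2 ≤ q) && pvBad delta q inc) primes :=
      List.mem_filter.mpr ⟨hmem, by simp [hb, hp2]⟩
    simp [PySem.Set.mem_ofList, hin]

-- the staged pass equals factorize-then-check
theorem pvMain (delta : Int) (inc : Bool) (primes : List Int) :
    ∀ (ps : List Int) (t : Int), 1 ≤ t →
      (∀ p ∈ ps, p ∈ primes) → (∀ p ∈ ps, 2 ≤ p ∨ t < p * p) →
      pvCheck delta inc (pvFactAux ps t)
        = pvBPass delta inc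
            (PySem.Set.ofList (primes.filter (fun p => decide (2 ≤ p) && pvBad delta p inc))) ps t := by
  intro ps
  induction ps with
  | nil => intro t ht _ _; rw [pvFactAux, pvBPass]; exact pvResid delta inc t
  | cons p ps ih =>
      intro t ht hmem hok
      rw [pvFactAux, pvBPass]
      by_cases hb : p * p > t
      · rw [if_pos hb, if_pos hb]; exact pvResid delta inc t
      · rw [if_neg hb, if_neg hb]
        have hp2 : 2 ≤ p := by
          rcases hok p (List.mem_cons_self ..) with h | h
          · exact h
          · omega
        have hmem' : ∀ q ∈ ps, q ∈ primes := fun q hq => hmem q (List.mem_cons_of_mem _ hq)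
        have hkernel := pvCore_aux p hp2 t.natAbs t le_rfl ht
        have hok' : ∀ t' : Int, t' ≤ t → ∀ q ∈ ps, 2 ≤ q ∨ t' < q * q := by
          intro t' hle q hq
          rcases hok q (List.mem_cons_of_mem _ hq) with h | h
          · exact Or.inl h
          · exact Or.inr (by omega)
        by_cases hm : PySem.Int.mod t p == 0
        · have hd : p ∣ t := by rw [beq_iff_eq, PySem.Int.mod_eq_zero_iff_dvd] at hm; exact hm
          rw [if_pos hm]
          rw [pvValLoop_eq_core p hp2 t.natAbs t 0 ht le_rfl]
          dsimp only
          rw [zero_add]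
          rw [show pvCheck delta inc ((p, (pvCore p t).2) :: pvFactAux ps (pvCore p t).1) =
              (if p == 2 then
                if inc && (chi_delta_p delta 2 == -1) && (PySem.Int.mod (pvCore p t).2 2 == 1) then false
                else pvCheck delta inc (pvFactAux ps (pvCore p t).1)
              else if (chi_delta_p delta p == -1) && (PySem.Int.mod (pvCore p t).2 2 == 1) then false
              else pvCheck delta inc (pvFactAux ps (pvCore p t).1)) from rfl]
          rw [pvCheck_cons_eq delta p (pvCore p t).2 inc]
          rw [pvStripSq_eq_core p hp2 t.natAbs t ht le_rfl]
          have hmod2 : PySem.Int.mod (pvCore p t).2 2 = (pvCore p t).2 % 2 :=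
            PySem.Int.mod_eq_emod_of_pos (by omega)
          by_cases hpar : (pvCore p t).2 % 2 = 0
          · -- even valuation: B's stripped value is the kernel, not divisible by p
            rw [if_pos hpar]
            have : (PySem.Int.mod (pvCore p t).2 2 == 1) = false := by
              rw [hmod2]; simp [hpar]
            rw [this, Bool.false_and, if_neg (by simp)]
            have hknd : (PySem.Int.mod (pvCore p t).1 p == 0) = false := by
              rw [beq_eq_false_iff_ne, Ne, PySem.Int.mod_eq_zero_iff_dvd]
              exact hkernel.2.2.1
            rw [hknd, if_neg (by simp)]
            exact ih (pvCore p t).1 hkernel.1 hmem' (hok' _ hkernel.2.1)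
          · -- odd valuation: B's stripped value is kernel * p, it survives the strip
            rw [if_neg hpar]
            have hodd : (PySem.Int.mod (pvCore p t).2 2 == 1) = true := by
              rw [hmod2, beq_iff_eq]
              have := Int.emod_two_eq_zero_or_one (pvCore p t).2
              omega
            rw [hodd, Bool.true_and]
            have hkd : (PySem.Int.mod ((pvCore p t).1 * p) p == 0) = true := by
              rw [beq_iff_eq, PySem.Int.mod_eq_zero_iff_dvd]; exact ⟨(pvCore p t).1, mul_comm _ _⟩
            rw [hkd, if_pos rfl]
            rw [pvContains delta inc primes p hp2 (hmem p (List.mem_cons_self ..))]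
            cases hbad : pvBad delta p inc
            · rw [if_neg (by simp), if_neg (by simp)]
              have hq : PySem.Int.floordiv ((pvCore p t).1 * p) p = (pvCore p t).1 := by
                rw [PySem.Int.floordiv_eq_ediv_of_pos (by omega)]
                exact Int.mul_ediv_cancel _ (by omega)
              rw [hq]
              exact ih (pvCore p t).1 hkernel.1 hmem' (hok' _ hkernel.2.1)
            · rw [if_pos rfl, if_pos rfl]
        · have hmf : (PySem.Int.mod t p == 0) = false := by simpa using hm
          rw [if_neg (by simp [hmf])]
          have hnd : ¬ p ∣ t := by
            rw [← PySem.Int.mod_eq_zero_iff_dvd]; simpa using hm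
          have hcore : pvCore p t = (t, 0) := pvCore_stop p t (by tauto)
          rw [pvStripSq_eq_core p hp2 t.natAbs t ht le_rfl, hcore]
          dsimp only
          rw [if_pos (show (0:Int) % 2 = 0 by norm_num), hmf, if_neg (by simp)]
          exact ih t ht hmem' (hok' t le_rfl)

-- ===== VERDICT (by name: the statement is the Claim_ definition above) =====
theorem is_norm_inerte_only_spec : Claim_equal_is_norm_inerte_only := by
  intro delta n primes inc _ hpre
  unfold Spec_is_norm_inerte_only is_norm_inerte_only is_norm_inerte_only_alt factorize_abs
  by_cases h0 : n ≤ 0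
  · simp [h0]
  · by_cases h1 : |n| ≤ 1
    · simp [h0, h1, pvCheck]
    · rw [if_neg h0, if_neg h0, if_neg h1, if_neg h1]
      dsimp only
      have habs : |n| = n := abs_of_pos (by omega)
      have hok : ∀ p ∈ primes, 2 ≤ p ∨ |n| < p * p := by
        rcases hpre with h | h
        · exfalso; rw [habs] at h1; omega
        · exact h
      exact pvMain delta inc primes primes |n| (by omega) (fun p hp => hp) hok
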